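-- pv_equiv track=rewrite | github.com/MohammadHarakeh/foundations-cs-python | Assignment2.py | upperLower
-- ===== SOURCE A (Python) =====
-- def upperLower(z):
--     x = ""
--     y = ""
--     for i in range(len(z)):
--         if z[i].isupper():
--             x = x + z[i]
--         elif z[i].islower():
--             y = y + z[i]
--     return x + y
-- ===== SOURCE B (Python) =====
-- def upperLower(z):
--     kept = [c for c in z if c.isupper() or c.islower()]
--     return ''.join(sorted(kept, key=lambda c: 0 if c.isupper() else 1))
-- ===== Notes on version B (the rewrite author's own statement) =====
-- stated objective: alternative
-- what changed: Replaces the two explicit accumulator strings built in one scan by a filter of the kept characters followed by a stable sort on a 0/1 key (upper before lower), the sort's stability preserving each group's original order.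
import Mathlib
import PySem

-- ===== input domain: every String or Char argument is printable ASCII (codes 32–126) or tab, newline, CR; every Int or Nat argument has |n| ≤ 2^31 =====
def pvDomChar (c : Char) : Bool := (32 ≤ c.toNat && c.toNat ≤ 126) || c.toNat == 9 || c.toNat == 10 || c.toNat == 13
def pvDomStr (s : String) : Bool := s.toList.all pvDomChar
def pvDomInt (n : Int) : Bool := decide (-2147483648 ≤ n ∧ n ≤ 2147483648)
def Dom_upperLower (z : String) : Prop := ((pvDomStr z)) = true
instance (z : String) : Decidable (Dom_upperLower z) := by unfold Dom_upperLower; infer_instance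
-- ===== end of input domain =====

-- B replaces A's one-pass pair of accumulator strings by filter-then-stable-sort on a 0/1 key (alternative decomposition; not claimed faster).


-- ===== PORT A =====
-- Python string accumulators x, y are carried as List Char (concatenation = list append, exact);
-- z[i] with i drawn from range(len(z)) is always in range, so pyGetD's default is never used.
def upperLower (z : String) : String :=
  let cs := z.toList
  let r := (PySem.List.pyRange 0 (cs.length : Int) 1).foldl
    (fun (acc : List Char × List Char) i =>
      let c := PySem.List.pyGetD cs i ' '
      if PySem.Str.isupper c then (acc.1 ++ [c], acc.2)
      else if PySem.Str.islower c then (acc.1, acc.2 ++ [c])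
      else acc) ([], [])
  String.ofList (r.1 ++ r.2)

-- ===== PORT B =====
def upperLower_alt (z : String) : String :=
  let kept := z.toList.filter (fun c => PySem.Str.isupper c || PySem.Str.islower c)
  String.ofList (PySem.List.sorted kept (fun c => if PySem.Str.isupper c then (0 : Int) else 1))

-- ===== PRECONDITION & SPEC =====
def Spec_upperLower (z : String) (out : String) : Prop := out = upperLower_alt z
instance (z : String) (out : String) : Decidable (Spec_upperLower z out) := by unfold Spec_upperLower; infer_instance

-- ===== CLAIM (what is proved, stated in full; the proofs are below) =====
def Claim_equal_upperLower : Prop := ∀ (z : String), Dom_upperLower z → Spec_upperLower z (upperLower z)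

-- ===== LEMMAS AND PROOFS =====

-- the 0/1 key and its comparison used by B's sort
def pvKey (c : Char) : Int := if PySem.Str.isupper c then 0 else 1
def pvBef (a b : Char) : Bool := decide (pvKey a < pvKey b)

lemma pvKey_le_one (c : Char) : pvKey c ≤ 1 := by
  unfold pvKey; split <;> norm_num

lemma insert_lower (x : Char) (hx : PySem.Str.isupper x = false) (ys : List Char) :
    PySem.List.insertBy pvBef x ys = ys ++ [x] := by
  apply PySem.List.insertBy_of_forall_not_before
  intro y _
  have := pvKey_le_one y
  simp [pvBef, pvKey, hx]
  omega

lemma insert_upper (x : Char) (hx : PySem.Str.isupper x = true)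
    (us ls : List Char) (hus : ∀ u ∈ us, PySem.Str.isupper u = true)
    (hls : ∀ c ∈ ls, PySem.Str.isupper c = false) :
    PySem.List.insertBy pvBef x (us ++ ls) = us ++ x :: ls := by
  induction us with
  | nil =>
    cases ls with
    | nil => simp [PySem.List.insertBy]
    | cons h t =>
      have hh := hls h (by simp)
      simp [PySem.List.insertBy, pvBef, pvKey, hx, hh]
  | cons u us ih =>
    have hu := hus u (by simp)
    have : pvBef x u = false := by simp [pvBef, pvKey, hx, hu]
    simp [PySem.List.insertBy, this, ih (fun w hw => hus w (by simp [hw])) ]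

lemma sorted_split (l us ls : List Char)
    (hus : ∀ u ∈ us, PySem.Str.isupper u = true)
    (hls : ∀ c ∈ ls, PySem.Str.isupper c = false) :
    l.foldl (fun acc x => PySem.List.insertBy pvBef x acc) (us ++ ls)
      = (us ++ l.filter (fun c => PySem.Str.isupper c))
        ++ (ls ++ l.filter (fun c => !PySem.Str.isupper c)) := by
  induction l generalizing us ls with
  | nil => simp
  | cons x l ih =>
    by_cases hU : PySem.Str.isupper x = true
    · have h1 : PySem.List.insertBy pvBef x (us ++ ls) = (us ++ [x]) ++ ls := by
        rw [insert_upper x hU us ls hus hls]; simp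
      have h2 := ih (us ++ [x]) ls
        (by intro u hu; rcases List.mem_append.1 hu with h | h
            · exact hus u h
            · simp at h; subst h; exact hU) hls
      simp only [List.foldl_cons, h1, h2, List.filter_cons, hU]
      simp
    · have hU' : PySem.Str.isupper x = false := by simpa using hU
      have h1 : PySem.List.insertBy pvBef x (us ++ ls) = us ++ (ls ++ [x]) := by
        rw [insert_lower x hU' (us ++ ls)]; simp
      have h2 := ih us (ls ++ [x]) hus
        (by intro c hc; rcases List.mem_append.1 hc with h | h
            · exact hls c h
            · simp at h; subst h; exact hU')
      simp only [List.foldl_cons, h1, h2, List.filter_cons, hU']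
      simp

-- A's loop computes the two filters
lemma A_inv (l : List Char) (x y : List Char) :
    l.foldl (fun (acc : List Char × List Char) c =>
        if PySem.Str.isupper c then (acc.1 ++ [c], acc.2)
        else if PySem.Str.islower c then (acc.1, acc.2 ++ [c])
        else acc) (x, y)
      = (x ++ l.filter (fun c => PySem.Str.isupper c),
         y ++ l.filter (fun c => !PySem.Str.isupper c && PySem.Str.islower c)) := by
  induction l generalizing x y with
  | nil => simp
  | cons c l ih =>
    simp only [List.foldl_cons, List.filter_cons]
    by_cases hU : PySem.Str.isupper c = true
    · simp [hU, ih]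
    · have hU' : PySem.Str.isupper c = false := by simpa using hU
      by_cases hL : PySem.Str.islower c = true
      · simp [hU', hL, ih]
      · have hL' : PySem.Str.islower c = false := by simpa using hL
        simp [hU', hL', ih]

-- ===== VERDICT (by name: the statement is the Claim_ definition above) =====
theorem upperLower_spec : Claim_equal_upperLower := by
  intro z _
  unfold Spec_upperLower upperLower upperLower_alt
  simp only []
  rw [PySem.List.foldl_pyRange_pyGetD' z.toList ' '
        (fun (acc : List Char × List Char) c =>
          if PySem.Str.isupper c then (acc.1 ++ [c], acc.2)
          else if PySem.Str.islower c then (acc.1, acc.2 ++ [c])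
          else acc) ([], []) (le_refl 0)]
  simp only [Int.toNat_zero, List.drop_zero]
  rw [A_inv]
  rw [show (fun c => if PySem.Str.isupper c then (0 : Int) else 1) = pvKey from rfl]
  rw [PySem.List.sorted_eq_foldl_insertBy]
  rw [show (fun (acc : List Char) x => PySem.List.insertBy (fun a b => decide (pvKey a < pvKey b)) x acc)
        = fun acc x => PySem.List.insertBy pvBef x acc from rfl]
  rw [show ([] : List Char) = ([] : List Char) ++ ([] : List Char) from rfl,
      sorted_split _ [] [] (by simp) (by simp)]
  simp only [List.nil_append, List.filter_filter]
  have h1 : ∀ c : Char, (PySem.Str.isupper c && (PySem.Str.isupper c || PySem.Str.islower c)) = PySem.Str.isupper c := by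
    intro c; cases PySem.Str.isupper c <;> simp
  have h2 : ∀ c : Char, ((!PySem.Str.isupper c) && (PySem.Str.isupper c || PySem.Str.islower c)) = (!PySem.Str.isupper c && PySem.Str.islower c) := by
    intro c; cases PySem.Str.isupper c <;> simp
  simp only [h1, h2]
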